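-- pv_equiv track=rewrite | github.com/jrmat/COSC326 | Epidemic/epidemic.py | state_1D
-- ===== SOURCE A (Python) =====
-- def state_1D(arr, length):
--     while True:  # loops until final state is found
--         sick = 0
--         for i in range(length):
--             neighbours = ""
--             if arr[i] == ".":  # check vulnerable individuals immediate neighbours for sickness
--                 if i - 1 >= 0:
--                     neighbours += arr[i - 1]
--                 if i + 1 < len(arr):
--                     neighbours += arr[i + 1]
--                 if neighbours.count("S") == 2:  # checks if two immediate neighbours are sick
--                     arr[i] = "S"  # if so, change individual's status to sick
--                     sick += 1
--         if sick == 0:  # if no new individuals are sick breaks the loop as final state is found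
--             break
--
--     return arr  # returns array in final state
-- ===== SOURCE B (Python) =====
-- def state_1D(arr, length):
--     orig = arr[:]  # decisions are taken from a snapshot of the initial state
--     for i in range(length):
--         if orig[i] == ".":
--             neighbours = (orig[i - 1] if i - 1 >= 0 else "") + (orig[i + 1] if i + 1 < len(arr) else "")
--             if neighbours.count("S") == 2:
--                 arr[i] = "S"
--     return arr
-- ===== Notes on version B (the rewrite author's own statement) =====
-- stated objective: simpler
-- what changed: Replaces A's repeated in-place passes under a while-loop with a single pass that decides each cell from an unchanged snapshot of the initial array, dropping the outer loop and the sick counter.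
-- outside the precondition, e.g. on state_1D(['SS', '.', '.', 'S'], 4): A returns ['SS', 'S', 'S', 'S'], B returns ['SS', 'S', '.', 'S']; on state_1D(['.', '.'], 3): A raises IndexError, B raises IndexError
import Mathlib
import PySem

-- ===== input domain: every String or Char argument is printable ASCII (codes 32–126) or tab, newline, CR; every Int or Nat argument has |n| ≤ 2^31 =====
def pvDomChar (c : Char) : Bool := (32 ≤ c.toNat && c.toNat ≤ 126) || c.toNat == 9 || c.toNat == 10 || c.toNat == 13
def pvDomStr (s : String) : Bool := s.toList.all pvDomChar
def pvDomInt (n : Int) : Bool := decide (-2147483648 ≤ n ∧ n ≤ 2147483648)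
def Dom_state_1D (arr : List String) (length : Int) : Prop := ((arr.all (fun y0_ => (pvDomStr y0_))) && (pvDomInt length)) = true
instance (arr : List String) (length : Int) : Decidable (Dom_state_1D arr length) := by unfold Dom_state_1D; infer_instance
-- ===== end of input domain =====

-- B replaces A's repeated in-place passes by one pass over a snapshot of the initial array (simpler);
-- both Pythons mutate `arr` in place the same way — the theorems below are about the returned value.

-- ===== PORT A =====
-- body of A's `for i in range(length)` loop: state is (current array, sick counter)
def stepA (st : List String × Int) (i : Int) : List String × Int :=
  match PySem.List.pyGet? st.1 i with
  | none => st        -- arr[i] raised IndexError (outside Pre_)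
  | some v =>
    if v = "." then
      let neighbours :=
        (if 0 ≤ i - 1 then (PySem.List.pyGet? st.1 (i - 1)).getD "" else "") ++
        (if i + 1 < (st.1.length : Int) then (PySem.List.pyGet? st.1 (i + 1)).getD "" else "")
      if PySem.Str.count neighbours "S" = 2 then (PySem.List.pySetD st.1 i "S", st.2 + 1)
      else st
    else st

-- one full `for i in range(length)` pass, starting with sick = 0
def passA (a : List String) (length : Int) : List String × Int :=
  (PySem.List.pyRange 0 length 1).foldl stepA (a, 0)

-- A's `while True`: a pass that does not break sickens at least one '.' cell, so within Pre_
-- arr.length + 1 iterations of fuel always reach the break (proved implicitly by the claim).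
def loopA (fuel : Nat) (a : List String) (length : Int) : List String :=
  match fuel with
  | 0 => a
  | f + 1 =>
    let p := passA a length
    if p.2 = 0 then p.1 else loopA f p.1 length

def state_1D (arr : List String) (length : Int) : List String :=
  loopA (arr.length + 1) arr length

-- ===== PORT B =====
-- body of B's single loop: decisions read the snapshot `orig`, writes go to the current array
def stepB (orig : List String) (a : List String) (i : Int) : List String :=
  match PySem.List.pyGet? orig i with
  | none => a         -- orig[i] raised IndexError (outside Pre_)
  | some v =>
    if v = "." then
      let neighbours :=
        (if 0 ≤ i - 1 then (PySem.List.pyGet? orig (i - 1)).getD "" else "") ++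
        (if i + 1 < (a.length : Int) then (PySem.List.pyGet? orig (i + 1)).getD "" else "")
      if PySem.Str.count neighbours "S" = 2 then PySem.List.pySetD a i "S" else a
    else a

def state_1D_alt (arr : List String) (length : Int) : List String :=
  (PySem.List.pyRange 0 length 1).foldl (stepB arr) arr

-- ===== PRECONDITION & SPEC =====
-- Pre_ excludes calls with length > len(arr), on which A raises IndexError, and arrays containing an
-- element with two or more 'S' characters: such malformed multi-state cells make A's in-place passes
-- cascade in an order-dependent way, an accidental corner where neither result is specified.
def Pre_state_1D (arr : List String) (length : Int) : Prop :=
  length ≤ (arr.length : Int) ∧ ∀ s ∈ arr, PySem.Str.count s "S" ≤ 1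
instance (arr : List String) (length : Int) : Decidable (Pre_state_1D arr length) := by
  unfold Pre_state_1D; infer_instance

def pvWitness_state_1D : List String × Int := (["S", ".", "S", ".", "I"], 5)

def Spec_state_1D (arr : List String) (length : Int) (out : List String) : Prop := out = state_1D_alt arr length
instance (arr : List String) (length : Int) (out : List String) : Decidable (Spec_state_1D arr length out) := by unfold Spec_state_1D; infer_instance

-- ===== CLAIM (what is proved, stated in full; the proofs are below) =====
def Claim_equal_state_1D : Prop := ∀ (arr : List String) (length : Int), Dom_state_1D arr length → Pre_state_1D arr length → Spec_state_1D arr length (state_1D arr length)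

-- ===== LEMMAS AND PROOFS =====

-- number of 'S' chars among the (original) neighbours of cell j, with the ports' exact bounds
def nbCount (arr : List String) (j : Nat) : Nat :=
  (if 1 ≤ j then (arr[j - 1]?.getD "").toList.count 'S' else 0) +
  (if j + 1 < arr.length then (arr[j + 1]?.getD "").toList.count 'S' else 0)

-- cell j gets sickened (reading from arr)
def fireB (arr : List String) (j : Nat) : Bool :=
  (arr[j]? == some ".") && (nbCount arr j == 2)

lemma countGo_single (fuel : Nat) : ∀ (s : List Char) (acc : Nat), s.length ≤ fuel →
    PySem.Chars.count.go ['S'] fuel s acc = acc + s.count 'S' := by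
  induction fuel with
  | zero =>
    intro s acc h
    have hs : s = [] := List.eq_nil_of_length_eq_zero (by omega)
    subst hs
    simp [PySem.Chars.count.go]
  | succ f ih =>
    intro s acc h
    cases s with
    | nil => simp [PySem.Chars.count.go]
    | cons c t =>
      unfold PySem.Chars.count.go
      by_cases hc : c = 'S'
      · subst hc
        simp only [List.isPrefixOf, List.length_cons] at *
        simp [ih t (acc + 1) (by omega)]
        omega
      · simp [List.isPrefixOf, hc, ih t acc (by simpa using Nat.le_of_succ_le_succ h)]
        intro hcc
        exact absurd hcc.symm hc

lemma strCount_S (s : String) : PySem.Str.count s "S" = s.toList.count 'S' := by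
  have h1 : PySem.Str.count s "S" = PySem.Chars.count s.toList ['S'] := by simp
  rw [h1]
  unfold PySem.Chars.count
  simp only [List.isEmpty_cons, Bool.false_eq_true, if_false]
  simpa using countGo_single s.toList.length s.toList 0 le_rfl

lemma elem_count_le (arr : List String) (hpre : ∀ s ∈ arr, PySem.Str.count s "S" ≤ 1)
    (j : Nat) : (arr[j]?.getD "").toList.count 'S' ≤ 1 := by
  cases h : arr[j]? with
  | none => simp
  | some s =>
    have hm : s ∈ arr := by
      obtain ⟨hlt, he⟩ := List.getElem?_eq_some_iff.mp h
      exact he ▸ List.getElem_mem hlt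
    have hc := hpre s hm
    rw [strCount_S] at hc
    simpa using hc

-- a cell whose right neighbour was '.' cannot fire
lemma fireB_false_right (arr : List String) (hpre : ∀ s ∈ arr, PySem.Str.count s "S" ≤ 1)
    (j : Nat) (hdot : arr[j + 1]? = some ".") : fireB arr j = false := by
  have hlt : j + 1 < arr.length := (List.getElem?_eq_some_iff.mp hdot).1
  unfold fireB
  rw [Bool.and_eq_false_iff]
  right
  rw [beq_eq_false_iff_ne]
  unfold nbCount
  rw [if_pos hlt, hdot]
  have hleft : (if 1 ≤ j then (arr[j - 1]?.getD "").toList.count 'S' else 0) ≤ 1 := by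
    split
    · exact elem_count_le arr hpre (j - 1)
    · omega
  have hz : (((some "." : Option String)).getD "").toList.count 'S' = 0 := by decide
  rw [hz]
  omega

-- a cell whose left neighbour was '.' cannot fire
lemma fireB_false_left (arr : List String) (hpre : ∀ s ∈ arr, PySem.Str.count s "S" ≤ 1)
    (j : Nat) (hdot : arr[j]? = some ".") : fireB arr (j + 1) = false := by
  unfold fireB
  rw [Bool.and_eq_false_iff]
  right
  rw [beq_eq_false_iff_ne]
  unfold nbCount
  rw [if_pos (by omega : 1 ≤ j + 1), show j + 1 - 1 = j by omega, hdot]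
  have hright : (if j + 1 + 1 < arr.length then (arr[j + 1 + 1]?.getD "").toList.count 'S' else 0) ≤ 1 := by
    split
    · exact elem_count_le arr hpre (j + 1 + 1)
    · omega
  have hz : (((some "." : Option String)).getD "").toList.count 'S' = 0 := by decide
  rw [hz]
  omega

lemma stepB_char (arr a : List String) (j : Nat) (hj : j < arr.length)
    (hlen : a.length = arr.length) :
    stepB arr a (j : Int) = if fireB arr j then a.set j "S" else a := by
  unfold stepB
  rw [show PySem.List.pyGet? arr (j : Int) = arr[j]? from by simp, List.getElem?_eq_getElem hj]
  dsimp only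
  by_cases hv : arr[j] = "."
  · rw [if_pos hv]
    have harr : arr[j]? = some "." := by rw [List.getElem?_eq_getElem hj, hv]
    have hL : (if (0:Int) ≤ (j : Int) - 1 then (PySem.List.pyGet? arr ((j : Int) - 1)).getD "" else "") =
        (if 1 ≤ j then arr[j - 1]?.getD "" else "") := by
      by_cases h1 : 1 ≤ j
      · rw [if_pos (show (0:Int) ≤ (j : Int) - 1 by omega), if_pos h1,
            show ((j : Int) - 1) = ((j - 1 : Nat) : Int) by omega, PySem.List.pyGet?_natCast]
      · rw [if_neg (show ¬ ((0:Int) ≤ (j : Int) - 1) by omega), if_neg h1]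
    have hR : (if (j : Int) + 1 < (a.length : Int) then (PySem.List.pyGet? arr ((j : Int) + 1)).getD "" else "") =
        (if j + 1 < arr.length then arr[j + 1]?.getD "" else "") := by
      by_cases h1 : j + 1 < arr.length
      · rw [if_pos (show (j : Int) + 1 < (a.length : Int) by rw [hlen]; omega), if_pos h1,
            show ((j : Int) + 1) = ((j + 1 : Nat) : Int) by omega, PySem.List.pyGet?_natCast]
      · rw [if_neg (show ¬ ((j : Int) + 1 < (a.length : Int)) by rw [hlen]; omega), if_neg h1]
    rw [hL, hR]
    have hcount : PySem.Str.count
        ((if 1 ≤ j then arr[j - 1]?.getD "" else "") ++ (if j + 1 < arr.length then arr[j + 1]?.getD "" else "")) "S" =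
        nbCount arr j := by
      unfold nbCount
      rw [strCount_S, String.toList_append, List.count_append]
      congr 1 <;> (split <;> simp)
    rw [hcount]
    have hfire : fireB arr j = (nbCount arr j == 2) := by
      unfold fireB; rw [harr]; simp
    rw [hfire]
    by_cases h2 : nbCount arr j = 2
    · rw [if_pos h2]
      simp [h2]
    · rw [if_neg h2]
      simp [h2]
  · rw [if_neg hv]
    have hfire : fireB arr j = false := by
      unfold fireB; rw [List.getElem?_eq_getElem hj]; simp [hv]
    rw [hfire]
    simp

lemma stepA_char (arr b : List String) (c : Int) (j : Nat) (hj : j < arr.length)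
    (hlen : b.length = arr.length) (hcur : b[j]? = arr[j]?)
    (hl : 1 ≤ j → arr[j]? = some "." → b[j - 1]? = arr[j - 1]?)
    (hr : b[j + 1]? = arr[j + 1]?) :
    stepA (b, c) (j : Int) = (stepB arr b (j : Int), if fireB arr j then c + 1 else c) := by
  rw [stepB_char arr b j hj hlen]
  unfold stepA
  rw [show PySem.List.pyGet? (b, c).1 (j : Int) = arr[j]? from by simp [hcur], List.getElem?_eq_getElem hj]
  dsimp only
  by_cases hv : arr[j] = "."
  · rw [if_pos hv]
    have harr : arr[j]? = some "." := by rw [List.getElem?_eq_getElem hj, hv]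
    have hL : (if (0:Int) ≤ (j : Int) - 1 then (PySem.List.pyGet? b ((j : Int) - 1)).getD "" else "") =
        (if 1 ≤ j then arr[j - 1]?.getD "" else "") := by
      by_cases h1 : 1 ≤ j
      · rw [if_pos (show (0:Int) ≤ (j : Int) - 1 by omega), if_pos h1,
            show ((j : Int) - 1) = ((j - 1 : Nat) : Int) by omega, PySem.List.pyGet?_natCast,
            hl h1 harr]
      · rw [if_neg (show ¬ ((0:Int) ≤ (j : Int) - 1) by omega), if_neg h1]
    have hR : (if (j : Int) + 1 < (b.length : Int) then (PySem.List.pyGet? b ((j : Int) + 1)).getD "" else "") =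
        (if j + 1 < arr.length then arr[j + 1]?.getD "" else "") := by
      by_cases h1 : j + 1 < arr.length
      · rw [if_pos (show (j : Int) + 1 < (b.length : Int) by rw [hlen]; omega), if_pos h1,
            show ((j : Int) + 1) = ((j + 1 : Nat) : Int) by omega, PySem.List.pyGet?_natCast, hr]
      · rw [if_neg (show ¬ ((j : Int) + 1 < (b.length : Int)) by rw [hlen]; omega), if_neg h1]
    rw [hL, hR]
    have hcount : PySem.Str.count
        ((if 1 ≤ j then arr[j - 1]?.getD "" else "") ++ (if j + 1 < arr.length then arr[j + 1]?.getD "" else "")) "S" =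
        nbCount arr j := by
      unfold nbCount
      rw [strCount_S, String.toList_append, List.count_append]
      congr 1 <;> (split <;> simp)
    rw [hcount]
    have hfire : fireB arr j = (nbCount arr j == 2) := by
      unfold fireB; rw [harr]; simp
    rw [hfire]
    by_cases h2 : nbCount arr j = 2
    · rw [if_pos h2]
      simp [h2]
    · rw [if_neg h2]
      simp [h2]
  · rw [if_neg hv]
    have hfire : fireB arr j = false := by
      unfold fireB; rw [List.getElem?_eq_getElem hj]; simp [hv]
    rw [hfire]
    simp

-- characterisation of B's fold over range(k): length and every entry
lemma Bfold_spec (arr : List String) (k : Nat) (hk : k ≤ arr.length) :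
    ((PySem.List.pyRange 0 (k : Int) 1).foldl (stepB arr) arr).length = arr.length ∧
    ∀ j : Nat, ((PySem.List.pyRange 0 (k : Int) 1).foldl (stepB arr) arr)[j]? =
      if j < k ∧ fireB arr j = true then some "S" else arr[j]? := by
  induction k with
  | zero =>
    rw [PySem.List.pyRange_one_eq_nil (by omega)]
    simp
  | succ k ih =>
    obtain ⟨ihlen, ihget⟩ := ih (by omega)
    have hsplit : PySem.List.pyRange 0 ((k + 1 : Nat) : Int) 1 =
        PySem.List.pyRange 0 (k : Int) 1 ++ [(k : Int)] := by
      rw [show ((k + 1 : Nat) : Int) = (k : Int) + 1 by omega,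
          PySem.List.pyRange_one_succ_right (by omega)]
    rw [hsplit, List.foldl_append]
    simp only [List.foldl_cons, List.foldl_nil]
    rw [stepB_char arr _ k (by omega) ihlen]
    by_cases hf : fireB arr k = true
    · rw [if_pos hf]
      refine ⟨by rw [List.length_set, ihlen], ?_⟩
      intro j
      rw [List.getElem?_set, ihlen]
      by_cases hjk : k = j
      · subst hjk
        rw [if_pos rfl, if_pos (by omega), if_pos ⟨by omega, hf⟩]
      · rw [if_neg hjk, ihget j]
        have hiff : (j < k ∧ fireB arr j = true) ↔ (j < k + 1 ∧ fireB arr j = true) := by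
          constructor
          · rintro ⟨h1, h2⟩; exact ⟨by omega, h2⟩
          · rintro ⟨h1, h2⟩; exact ⟨by omega, h2⟩
        exact if_congr hiff rfl rfl
    · rw [if_neg hf]
      refine ⟨ihlen, ?_⟩
      intro j
      rw [ihget j]
      have hiff : (j < k ∧ fireB arr j = true) ↔ (j < k + 1 ∧ fireB arr j = true) := by
        constructor
        · rintro ⟨h1, h2⟩; exact ⟨by omega, h2⟩
        · rintro ⟨h1, h2⟩
          refine ⟨?_, h2⟩
          rcases Nat.lt_succ_iff_lt_or_eq.mp h1 with h | h
          · exact h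
          · subst h; exact absurd h2 hf
      exact if_congr hiff rfl rfl

-- every element of B's result is "S" or an element of arr, so Pre_'s bound carries over
lemma Bfold_pre (arr : List String) (hpre : ∀ s ∈ arr, PySem.Str.count s "S" ≤ 1)
    (k : Nat) (hk : k ≤ arr.length) :
    ∀ s ∈ (PySem.List.pyRange 0 (k : Int) 1).foldl (stepB arr) arr, PySem.Str.count s "S" ≤ 1 := by
  intro s hs
  obtain ⟨j, hjlt, hjs⟩ := List.getElem_of_mem hs
  have h2 : ((PySem.List.pyRange 0 (k : Int) 1).foldl (stepB arr) arr)[j]? = some s := by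
    rw [List.getElem?_eq_getElem hjlt, hjs]
  rw [(Bfold_spec arr k hk).2 j] at h2
  by_cases hc : j < k ∧ fireB arr j = true
  · rw [if_pos hc] at h2
    have : s = "S" := by injection h2 with h; exact h.symm
    subst this
    rw [strCount_S]
    decide
  · rw [if_neg hc] at h2
    have hm : s ∈ arr := by
      obtain ⟨hlt, he⟩ := List.getElem?_eq_some_iff.mp h2
      exact he ▸ List.getElem_mem hlt
    exact hpre s hm

-- A's pass equals B's fold, and sick counts the fired cells
lemma pass1_spec (arr : List String) (hpre : ∀ s ∈ arr, PySem.Str.count s "S" ≤ 1)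
    (k : Nat) (hk : k ≤ arr.length) :
    (PySem.List.pyRange 0 (k : Int) 1).foldl stepA (arr, 0) =
      ((PySem.List.pyRange 0 (k : Int) 1).foldl (stepB arr) arr,
       ((List.range k).countP (fun j => fireB arr j) : Int)) := by
  induction k with
  | zero =>
    rw [PySem.List.pyRange_one_eq_nil (by omega)]
    simp
  | succ k ih =>
    have hk' : k ≤ arr.length := by omega
    obtain ⟨blen, bget⟩ := Bfold_spec arr k hk'
    have hsplit : PySem.List.pyRange 0 ((k + 1 : Nat) : Int) 1 =
        PySem.List.pyRange 0 (k : Int) 1 ++ [(k : Int)] := by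
      rw [show ((k + 1 : Nat) : Int) = (k : Int) + 1 by omega,
          PySem.List.pyRange_one_succ_right (by omega)]
    rw [hsplit, List.foldl_append, List.foldl_append]
    simp only [List.foldl_cons, List.foldl_nil]
    rw [ih hk']
    have hcur : ((PySem.List.pyRange 0 (k : Int) 1).foldl (stepB arr) arr)[k]? = arr[k]? := by
      rw [bget k]; exact if_neg (by rintro ⟨h, -⟩; omega)
    have hl : 1 ≤ k → arr[k]? = some "." →
        ((PySem.List.pyRange 0 (k : Int) 1).foldl (stepB arr) arr)[k - 1]? = arr[k - 1]? := by
      intro h1 hdot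
      rw [bget (k - 1)]
      have hff : fireB arr (k - 1) = false :=
        fireB_false_right arr hpre (k - 1) (by rw [show k - 1 + 1 = k by omega]; exact hdot)
      exact if_neg (by rintro ⟨-, h2⟩; rw [hff] at h2; simp at h2)
    have hr : ((PySem.List.pyRange 0 (k : Int) 1).foldl (stepB arr) arr)[k + 1]? = arr[k + 1]? := by
      rw [bget (k + 1)]; exact if_neg (by rintro ⟨h, -⟩; omega)
    rw [stepA_char arr _ _ k (by omega) blen hcur hl hr]
    rw [Prod.mk.injEq]
    refine ⟨rfl, ?_⟩
    rw [List.range_succ, List.countP_append]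
    simp only [List.countP_cons, List.countP_nil]
    by_cases hf : fireB arr k = true
    · rw [if_pos hf]
      simp [hf]
    · rw [if_neg hf]
      simp [hf]

-- on B's result no cell in range fires any more
lemma fireB_Bfold_false (arr : List String) (hpre : ∀ s ∈ arr, PySem.Str.count s "S" ≤ 1)
    (n : Nat) (hn : n ≤ arr.length) (j : Nat) (hj : j < n) :
    fireB ((PySem.List.pyRange 0 (n : Int) 1).foldl (stepB arr) arr) j = false := by
  obtain ⟨blen, bget⟩ := Bfold_spec arr n hn
  unfold fireB
  rw [bget j]
  by_cases hc : j < n ∧ fireB arr j = true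
  · rw [if_pos hc]
    rw [Bool.and_eq_false_iff]
    left
    rw [beq_eq_false_iff_ne]
    intro h
    injection h with h
    exact absurd h (by decide)
  · rw [if_neg hc]
    cases harr : arr[j]? with
    | none => simp
    | some v =>
      by_cases hv : v = "."
      · subst hv
        have hfj : fireB arr j = false := by
          rcases Bool.eq_false_or_eq_true (fireB arr j) with h | h
          · exact absurd ⟨hj, h⟩ hc
          · exact h
        have hnb : nbCount ((PySem.List.pyRange 0 (n : Int) 1).foldl (stepB arr) arr) j =
            nbCount arr j := by
          have hLeq : (if 1 ≤ j then ((((PySem.List.pyRange 0 (n : Int) 1).foldl (stepB arr) arr))[j - 1]?.getD "").toList.count 'S' else 0) =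
              (if 1 ≤ j then (arr[j - 1]?.getD "").toList.count 'S' else 0) := by
            by_cases hg1 : 1 ≤ j
            · have hff : fireB arr (j - 1) = false :=
                fireB_false_right arr hpre (j - 1) (by rw [show j - 1 + 1 = j by omega]; exact harr)
              rw [if_pos hg1, if_pos hg1, bget (j - 1),
                  if_neg (by rintro ⟨-, hhh⟩; rw [hff] at hhh; simp at hhh)]
            · rw [if_neg hg1, if_neg hg1]
          have hReq : (if j + 1 < arr.length then ((((PySem.List.pyRange 0 (n : Int) 1).foldl (stepB arr) arr))[j + 1]?.getD "").toList.count 'S' else 0) =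
              (if j + 1 < arr.length then (arr[j + 1]?.getD "").toList.count 'S' else 0) := by
            by_cases hg2 : j + 1 < arr.length
            · have hff : fireB arr (j + 1) = false := fireB_false_left arr hpre j harr
              rw [if_pos hg2, if_pos hg2, bget (j + 1),
                  if_neg (by rintro ⟨-, hhh⟩; rw [hff] at hhh; simp at hhh)]
            · rw [if_neg hg2, if_neg hg2]
          unfold nbCount
          rw [blen, hLeq, hReq]
        rw [hnb]
        have h2 : nbCount arr j ≠ 2 := by
          unfold fireB at hfj
          rw [harr] at hfj
          simpa using hfj
        simp [h2]
      · rw [Bool.and_eq_false_iff]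
        left
        rw [beq_eq_false_iff_ne]
        intro h
        injection h with h
        exact absurd h hv

-- a fixpoint of fireB is left unchanged by B's fold
lemma Bfold_fix (b : List String) (n : Nat) (hn : n ≤ b.length)
    (hfix : ∀ j, j < n → fireB b j = false) :
    (PySem.List.pyRange 0 (n : Int) 1).foldl (stepB b) b = b := by
  induction n with
  | zero =>
    rw [PySem.List.pyRange_one_eq_nil (by omega)]
    simp
  | succ n ih =>
    have hsplit : PySem.List.pyRange 0 ((n + 1 : Nat) : Int) 1 =
        PySem.List.pyRange 0 (n : Int) 1 ++ [(n : Int)] := by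
      rw [show ((n + 1 : Nat) : Int) = (n : Int) + 1 by omega,
          PySem.List.pyRange_one_succ_right (by omega)]
    rw [hsplit, List.foldl_append, ih (by omega) (fun j hj => hfix j (by omega))]
    simp only [List.foldl_cons, List.foldl_nil]
    rw [stepB_char b b n (by omega) rfl, hfix n (by omega)]
    simp

-- ===== VERDICT (by name: the statement is the Claim_ definition above) =====
theorem state_1D_spec : Claim_equal_state_1D := by
  intro arr length hdom hpre
  obtain ⟨hlen, hcnt⟩ := hpre
  unfold Spec_state_1D state_1D state_1D_alt
  by_cases hpos : 0 < length
  · set n := length.toNat with hn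
    have hcast : length = (n : Int) := by omega
    have hn_le : n ≤ arr.length := by omega
    rw [hcast]
    simp only [loopA]
    unfold passA
    rw [pass1_spec arr hcnt n hn_le]
    by_cases hzero : ((List.range n).countP (fun j => fireB arr j) : Int) = 0
    · simp [hzero]
    · dsimp only
      rw [if_neg hzero]
      have hn1 : 1 ≤ n := by
        by_contra hh
        apply hzero
        rw [show n = 0 by omega]
        simp
      obtain ⟨m, hm⟩ : ∃ m, arr.length = m + 1 := ⟨arr.length - 1, by omega⟩
      rw [hm]
      simp only [loopA]
      unfold passA
      have hpre_b : ∀ s ∈ (PySem.List.pyRange 0 (n : Int) 1).foldl (stepB arr) arr,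
          PySem.Str.count s "S" ≤ 1 := Bfold_pre arr hcnt n hn_le
      have hblen : ((PySem.List.pyRange 0 (n : Int) 1).foldl (stepB arr) arr).length = arr.length :=
        (Bfold_spec arr n hn_le).1
      rw [pass1_spec _ hpre_b n (by omega)]
      have hfixcnt : (List.range n).countP
          (fun j => fireB ((PySem.List.pyRange 0 (n : Int) 1).foldl (stepB arr) arr) j) = 0 :=
        List.countP_eq_zero.mpr (fun j hj => by
          simpa using fireB_Bfold_false arr hcnt n hn_le j (List.mem_range.mp hj))
      have hB2 : (PySem.List.pyRange 0 (n : Int) 1).foldl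
          (stepB ((PySem.List.pyRange 0 (n : Int) 1).foldl (stepB arr) arr))
          ((PySem.List.pyRange 0 (n : Int) 1).foldl (stepB arr) arr) =
          (PySem.List.pyRange 0 (n : Int) 1).foldl (stepB arr) arr :=
        Bfold_fix _ n (by omega) (fun j hj => fireB_Bfold_false arr hcnt n hn_le j hj)
      rw [hB2, hfixcnt]
      simp
  · rw [PySem.List.pyRange_one_eq_nil (by omega)]
    simp only [loopA]
    unfold passA
    rw [PySem.List.pyRange_one_eq_nil (by omega)]
    simp
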